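-- pv_equiv track=rewrite | github.com/KaramAlshaikh/Derivative-integral-calculator | main.py | derive_term
-- ===== SOURCE A (Python) =====
-- def derive_term(term, sign):
-- 	while term[-1] == " ": ########## Makes sure there are no spaces before or after term
-- 		term = term[:-1]
-- 	while term[0] == " ":
-- 		term = term[1:]
--
-- 	coefficient = 0
-- 	exponent = 0
--
-- 	char_number = 0 ########## Used to know index place in string
--
-- 	for char in term:
-- 		if char == "x":
-- 			if char_number == 0:
-- 				if sign == 1:
-- 					coefficient = 1
--
-- 				else:
-- 					coefficient = -1
--
-- 			else:
-- 				coefficient = int(term[:char_number])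
--
-- 		elif char == "^":
-- 			exponent = int(term[char_number + 1:])
--
-- 		char_number += 1
--
-- 	new_coefficient = str(coefficient * exponent)
-- 	new_exponent = exponent - 1
--
-- 	if "x" not in term: ########## If the term is a constant
-- 		new_term = ""
--
-- 	elif "^" not in term: ########## If x has degree 1
-- 		new_term = " + " + str(sign * coefficient)
--
-- 	else:
-- 		if new_exponent == 1:
-- 			new_term = " + " + str(sign * int(new_coefficient)) + "x"
--
-- 		else:
-- 			new_term = " + " + str(sign * int(new_coefficient)) + "x^" + str(new_exponent)
--
-- 	new_term = new_term.replace("+ -", "- ")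
-- 	return str(new_term)
-- ===== SOURCE B (Python) =====
-- def derive_term(term, sign):
--     t = term.strip(' ')
--     if 'x' not in t:
--         return ''
--     pre = t[:t.rindex('x')]
--     coeff = (1 if sign == 1 else -1) if pre == '' else int(pre)
--     if '^' in t:
--         exp = int(t[t.rindex('^') + 1:])
--         value = sign * coeff * exp
--         tail = 'x' if exp == 2 else 'x^' + str(exp - 1)
--     else:
--         value = sign * coeff
--         tail = ''
--     return (' - ' if value < 0 else ' + ') + str(abs(value)) + tail
-- ===== Notes on version B (the rewrite author's own statement) =====
-- stated objective: idiomatic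
-- what changed: B drops A's manual trim loops, indexed last-write-wins char scan and the post-hoc replace('+ -','- ') rewrite: it strips with strip(' '), slices at rindex-located delimiters once, computes the signed result arithmetically and emits ' - '/' + ' plus abs(value) directly, so no replace pass over the output is needed.
import Mathlib
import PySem

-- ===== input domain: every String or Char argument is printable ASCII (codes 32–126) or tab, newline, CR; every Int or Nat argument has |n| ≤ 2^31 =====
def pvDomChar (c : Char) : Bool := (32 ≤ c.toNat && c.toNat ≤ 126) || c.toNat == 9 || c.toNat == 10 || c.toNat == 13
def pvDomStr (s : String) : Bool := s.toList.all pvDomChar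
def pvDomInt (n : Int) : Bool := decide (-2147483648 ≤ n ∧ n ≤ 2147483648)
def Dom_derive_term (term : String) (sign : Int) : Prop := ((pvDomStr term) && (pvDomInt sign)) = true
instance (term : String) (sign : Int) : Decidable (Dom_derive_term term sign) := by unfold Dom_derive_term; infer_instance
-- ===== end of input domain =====

-- B strips with strip(' '), slices at rindex-located delimiters, and formats the signed result arithmetically (' - '/' + ' + abs) instead of A's trim loops, indexed scan and trailing replace('+ -','- ') pass (idiomatic; return value only).

-- ===== PORT A =====
-- while term[-1] == " ": term = term[:-1]   (term[:-1] ported as dropLast: slice s none (some (-1)) = dropLast, exact)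
def pvStripR (s : List Char) : List Char :=
  if h : PySem.List.pyGet? s (-1) = some ' ' then pvStripR s.dropLast else s
termination_by s.length
decreasing_by
  cases s with
  | nil => simp [PySem.List.pyGet?, PySem.List.pyIdx?] at h
  | cons a t => simp

-- while term[0] == " ": term = term[1:]   (term[1:] ported as tail, exact)
def pvStripL (s : List Char) : List Char :=
  if h : PySem.List.pyGet? s 0 = some ' ' then pvStripL s.tail else s
termination_by s.length
decreasing_by
  cases s with
  | nil => simp [PySem.List.pyGet?, PySem.List.pyIdx?] at h
  | cons a t => simp

-- one iteration of A's `for char in term` loop, state = (coefficient, exponent);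
-- int(...) that would raise ValueError is `(ofChars? _).getD 0` here — those inputs are outside Pre_.
def pvStepA (t : List Char) (sign : Int) (st : Int × Int) (p : Int × Char) : Int × Int :=
  if p.2 = 'x' then
    ((if p.1 = 0 then (if sign = 1 then (1 : Int) else -1)
      else (PySem.Int.ofChars? (PySem.List.slice t none (some p.1))).getD 0), st.2)
  else if p.2 = '^' then
    (st.1, (PySem.Int.ofChars? (PySem.List.slice t (some (p.1 + 1)) none)).getD 0)
  else st

def derive_term (term : String) (sign : Int) : String :=
  let t := pvStripL (pvStripR term.toList)
  let st := (PySem.List.enumerate t 0).foldl (pvStepA t sign) (0, 0)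
  let coefficient := st.1
  let exponent := st.2
  let new_coefficient := PySem.Int.toChars (coefficient * exponent)
  let new_exponent := exponent - 1
  let new_term : List Char :=
    if PySem.Chars.isIn ['x'] t = false then []
    else if PySem.Chars.isIn ['^'] t = false then
      [' ', '+', ' '] ++ PySem.Int.toChars (sign * coefficient)
    else if new_exponent = 1 then
      [' ', '+', ' '] ++ PySem.Int.toChars (sign * (PySem.Int.ofChars? new_coefficient).getD 0) ++ ['x']
    else
      [' ', '+', ' '] ++ PySem.Int.toChars (sign * (PySem.Int.ofChars? new_coefficient).getD 0)
        ++ ['x', '^'] ++ PySem.Int.toChars new_exponent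
  String.mk (PySem.Chars.replace new_term ['+', ' ', '-'] ['-', ' '])

-- ===== PORT B =====
def derive_term_alt (term : String) (sign : Int) : String :=
  let t := PySem.Chars.stripChars term.toList [' ']
  if PySem.Chars.isIn ['x'] t = false then String.mk []
  else
    let pre := PySem.List.slice t none (some (PySem.Chars.rfind t ['x']))
    let coeff : Int :=
      if pre = [] then (if sign = 1 then 1 else -1) else (PySem.Int.ofChars? pre).getD 0
    let vt : Int × List Char :=
      if PySem.Chars.isIn ['^'] t = false then (sign * coeff, [])
      else
        let exp := (PySem.Int.ofChars? (PySem.List.slice t (some (PySem.Chars.rfind t ['^'] + 1)) none)).getD 0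
        (sign * coeff * exp, if exp = 2 then ['x'] else ['x', '^'] ++ PySem.Int.toChars (exp - 1))
    String.mk ((if vt.1 < 0 then [' ', '-', ' '] else [' ', '+', ' '])
      ++ PySem.Int.toChars (vt.1.natAbs : Int) ++ vt.2)

-- ===== PRECONDITION & SPEC =====
-- Pre_ excludes exactly the inputs where Python A raises: all-space/empty term (IndexError on term[-1]),
-- and terms where some int(...) the loop performs raises ValueError (the prefix before an 'x' at i>0,
-- or the suffix after a '^', fails to parse as an int).
def Pre_derive_term (term : String) (sign : Int) : Prop :=
  let t := PySem.Chars.stripChars term.toList [' ']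
  t ≠ [] ∧
  (∀ i : Nat, (h : i < t.length) →
    (t[i] = 'x' → 0 < i → (PySem.Int.ofChars? (t.take i)).isSome = true) ∧
    (t[i] = '^' → (PySem.Int.ofChars? (t.drop (i + 1))).isSome = true))
instance (term : String) (sign : Int) : Decidable (Pre_derive_term term sign) := by
  unfold Pre_derive_term; infer_instance

def pvWitness_derive_term : String × Int := ("2x^3", 1)

def Spec_derive_term (term : String) (sign : Int) (out : String) : Prop := out = derive_term_alt term sign
instance (term : String) (sign : Int) (out : String) : Decidable (Spec_derive_term term sign out) := by
  unfold Spec_derive_term; infer_instance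

-- ===== CLAIM (what is proved, stated in full; the proofs are below) =====
def Claim_equal_derive_term : Prop := ∀ (term : String) (sign : Int), Dom_derive_term term sign → Pre_derive_term term sign → Spec_derive_term term sign (derive_term term sign)

-- ===== LEMMAS AND PROOFS =====

-- digit value fold (msd first)
def pvValD (ds : List Char) : Nat := ds.foldl (fun n c => n * 10 + (c.toNat - '0'.toNat)) 0

theorem pvValD_foldl (ds : List Char) : ∀ a : Nat,
    ds.foldl (fun n c => n * 10 + (c.toNat - '0'.toNat)) a = a * 10 ^ ds.length + pvValD ds := by
  induction ds with
  | nil => intro a; simp [pvValD]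
  | cons c tl ih =>
    intro a
    simp only [List.foldl_cons, List.length_cons, pvValD] at *
    rw [ih, ih (0 * 10 + (c.toNat - '0'.toNat))]
    ring

-- the general-accumulator parse result
def pvGoSpec (ds : List Char) (b : Bool) (a : Nat) : Option Nat :=
  if ds.isEmpty then (if b then some a else none)
  else some (a * 10 ^ ds.length + pvValD ds)

theorem pv_digit_cases (c : Char) (hc : c.isDigit = true) :
    c = '0' ∨ c = '1' ∨ c = '2' ∨ c = '3' ∨ c = '4' ∨ c = '5' ∨ c = '6' ∨ c = '7' ∨ c = '8' ∨ c = '9' := by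
  simp [Char.isDigit] at hc
  have h1 : 48 ≤ c.val.toNat := (UInt32.le_iff_toNat_le).mp hc.1
  have h2 : c.val.toNat ≤ 57 := (UInt32.le_iff_toNat_le).mp hc.2
  interval_cases h : c.val.toNat <;>
    [exact Or.inl (Char.ext (UInt32.toNat_inj.mp h));
     exact Or.inr (Or.inl (Char.ext (UInt32.toNat_inj.mp h)));
     exact Or.inr (Or.inr (Or.inl (Char.ext (UInt32.toNat_inj.mp h))));
     exact Or.inr (Or.inr (Or.inr (Or.inl (Char.ext (UInt32.toNat_inj.mp h)))));
     exact Or.inr (Or.inr (Or.inr (Or.inr (Or.inl (Char.ext (UInt32.toNat_inj.mp h))))));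
     exact Or.inr (Or.inr (Or.inr (Or.inr (Or.inr (Or.inl (Char.ext (UInt32.toNat_inj.mp h)))))));
     exact Or.inr (Or.inr (Or.inr (Or.inr (Or.inr (Or.inr (Or.inl (Char.ext (UInt32.toNat_inj.mp h))))))));
     exact Or.inr (Or.inr (Or.inr (Or.inr (Or.inr (Or.inr (Or.inr (Or.inl (Char.ext (UInt32.toNat_inj.mp h)))))))));
     exact Or.inr (Or.inr (Or.inr (Or.inr (Or.inr (Or.inr (Or.inr (Or.inr (Or.inl (Char.ext (UInt32.toNat_inj.mp h))))))))));
     exact Or.inr (Or.inr (Or.inr (Or.inr (Or.inr (Or.inr (Or.inr (Or.inr (Or.inr (Char.ext (UInt32.toNat_inj.mp h))))))))))]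

-- all-digit strings have no int-space and no sign chars
theorem pv_isIntSpace_of_digit (c : Char) (hc : c.isDigit = true) : PySem.Int.isIntSpace c = false := by
  rcases pv_digit_cases c hc with h|h|h|h|h|h|h|h|h|h <;> subst h <;> decide

theorem pvGoSpec_cons (c : Char) (tl : List Char) (b : Bool) (a : Nat) :
    pvGoSpec (c :: tl) b a = pvGoSpec tl true (a * 10 + (c.toNat - '0'.toNat)) := by
  cases tl with
  | nil => simp [pvGoSpec, pvValD]
  | cons d tl' =>
    simp only [pvGoSpec, List.isEmpty_cons, if_neg, Bool.false_eq_true, not_false_eq_true,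
      List.length_cons]
    congr 1
    have h1 := pvValD_foldl (d :: tl') (0 * 10 + (c.toNat - '0'.toNat))
    have h2 : pvValD (c :: d :: tl') = List.foldl (fun n c => n * 10 + (c.toNat - '0'.toNat)) (0 * 10 + (c.toNat - '0'.toNat)) (d :: tl') := rfl
    rw [h2, h1]
    simp only [List.length_cons, pow_succ]
    ring

theorem pv_dropWhile_digits (l : List Char) (hd : ∀ c ∈ l, c.isDigit = true) :
    List.dropWhile PySem.Int.isIntSpace l = l := by
  cases l with
  | nil => rfl
  | cons c tl =>
    rw [List.dropWhile_cons_of_neg]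
    simp [pv_isIntSpace_of_digit c (hd c (by simp))]

theorem pv_entry (c : Char) (tl : List Char) :
    some (pvValD (c :: tl)) = pvGoSpec tl true (0 * 10 + (c.toNat - '0'.toNat)) := by
  rw [← pvGoSpec_cons c tl false 0]
  simp [pvGoSpec, pvValD]

-- KEY: parse of an all-digit, nonempty string
theorem pv_ofChars_digits (ds : List Char) (hne : ds ≠ []) (hd : ∀ c ∈ ds, c.isDigit = true) :
    PySem.Int.ofChars? ds = some (pvValD ds) := by
  obtain ⟨c, tl, rfl⟩ := List.exists_cons_of_ne_nil hne
  simp only [PySem.Int.ofChars?]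
  rw [pv_dropWhile_digits _ hd]
  rw [pv_dropWhile_digits _ (by intro x hx; exact hd x (by rw [List.mem_reverse] at hx; exact hx))]
  rw [List.reverse_reverse]
  split
  · next cs ds heq =>
      obtain ⟨rfl, rfl⟩ := (List.cons.injEq ..).mp heq
      exact absurd (hd '-' (by simp)) (by decide)
  · next cs ds heq =>
      obtain ⟨rfl, rfl⟩ := (List.cons.injEq ..).mp heq
      exact absurd (hd '+' (by simp)) (by decide)
  · next cs h1 h2 =>
      have hW : ∀ (X : Option Nat), (Option.map (fun n : Int => n) (X >>= fun a => pure (↑a : Int))) = X.map Nat.cast := by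
        intro X; cases X <;> rfl
      rw [hW]
      have hR : ((some (pvValD (c :: tl)) : Option Nat) >>= fun a => pure (↑a : Int)) = Option.map Nat.cast (some (pvValD (c :: tl))) := rfl
      rw [hR]
      refine congrArg (Option.map Nat.cast) ?_
      have hdt : ∀ x ∈ tl, x.isDigit = true := fun x hx => hd x (by simp [hx])
      rcases pv_digit_cases c (hd c (by simp)) with rfl|rfl|rfl|rfl|rfl|rfl|rfl|rfl|rfl|rfl
      · conv_lhs => whnf
        rw [pv_entry '0' tl]
        generalize (0 : Nat) * 10 + ('0'.toNat - '0'.toNat) = a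
        clear hd hne h1 h2 hW hR
        revert hdt
        induction tl generalizing a with
        | nil => intro _; rfl
        | cons d tl2 IH =>
          intro hdt
          rw [pvGoSpec_cons d tl2 true a]
          rcases pv_digit_cases d (hdt d (by simp)) with rfl|rfl|rfl|rfl|rfl|rfl|rfl|rfl|rfl|rfl <;>
            exact IH _ (fun x hx => hdt x (by simp [hx]))
      · conv_lhs => whnf
        rw [pv_entry '1' tl]
        generalize (0 : Nat) * 10 + ('1'.toNat - '0'.toNat) = a
        clear hd hne h1 h2 hW hR
        revert hdt
        induction tl generalizing a with
        | nil => intro _; rfl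
        | cons d tl2 IH =>
          intro hdt
          rw [pvGoSpec_cons d tl2 true a]
          rcases pv_digit_cases d (hdt d (by simp)) with rfl|rfl|rfl|rfl|rfl|rfl|rfl|rfl|rfl|rfl <;>
            exact IH _ (fun x hx => hdt x (by simp [hx]))
      · conv_lhs => whnf
        rw [pv_entry '2' tl]
        generalize (0 : Nat) * 10 + ('2'.toNat - '0'.toNat) = a
        clear hd hne h1 h2 hW hR
        revert hdt
        induction tl generalizing a with
        | nil => intro _; rfl
        | cons d tl2 IH =>
          intro hdt
          rw [pvGoSpec_cons d tl2 true a]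
          rcases pv_digit_cases d (hdt d (by simp)) with rfl|rfl|rfl|rfl|rfl|rfl|rfl|rfl|rfl|rfl <;>
            exact IH _ (fun x hx => hdt x (by simp [hx]))
      · conv_lhs => whnf
        rw [pv_entry '3' tl]
        generalize (0 : Nat) * 10 + ('3'.toNat - '0'.toNat) = a
        clear hd hne h1 h2 hW hR
        revert hdt
        induction tl generalizing a with
        | nil => intro _; rfl
        | cons d tl2 IH =>
          intro hdt
          rw [pvGoSpec_cons d tl2 true a]
          rcases pv_digit_cases d (hdt d (by simp)) with rfl|rfl|rfl|rfl|rfl|rfl|rfl|rfl|rfl|rfl <;>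
            exact IH _ (fun x hx => hdt x (by simp [hx]))
      · conv_lhs => whnf
        rw [pv_entry '4' tl]
        generalize (0 : Nat) * 10 + ('4'.toNat - '0'.toNat) = a
        clear hd hne h1 h2 hW hR
        revert hdt
        induction tl generalizing a with
        | nil => intro _; rfl
        | cons d tl2 IH =>
          intro hdt
          rw [pvGoSpec_cons d tl2 true a]
          rcases pv_digit_cases d (hdt d (by simp)) with rfl|rfl|rfl|rfl|rfl|rfl|rfl|rfl|rfl|rfl <;>
            exact IH _ (fun x hx => hdt x (by simp [hx]))
      · conv_lhs => whnf
        rw [pv_entry '5' tl]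
        generalize (0 : Nat) * 10 + ('5'.toNat - '0'.toNat) = a
        clear hd hne h1 h2 hW hR
        revert hdt
        induction tl generalizing a with
        | nil => intro _; rfl
        | cons d tl2 IH =>
          intro hdt
          rw [pvGoSpec_cons d tl2 true a]
          rcases pv_digit_cases d (hdt d (by simp)) with rfl|rfl|rfl|rfl|rfl|rfl|rfl|rfl|rfl|rfl <;>
            exact IH _ (fun x hx => hdt x (by simp [hx]))
      · conv_lhs => whnf
        rw [pv_entry '6' tl]
        generalize (0 : Nat) * 10 + ('6'.toNat - '0'.toNat) = a
        clear hd hne h1 h2 hW hR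
        revert hdt
        induction tl generalizing a with
        | nil => intro _; rfl
        | cons d tl2 IH =>
          intro hdt
          rw [pvGoSpec_cons d tl2 true a]
          rcases pv_digit_cases d (hdt d (by simp)) with rfl|rfl|rfl|rfl|rfl|rfl|rfl|rfl|rfl|rfl <;>
            exact IH _ (fun x hx => hdt x (by simp [hx]))
      · conv_lhs => whnf
        rw [pv_entry '7' tl]
        generalize (0 : Nat) * 10 + ('7'.toNat - '0'.toNat) = a
        clear hd hne h1 h2 hW hR
        revert hdt
        induction tl generalizing a with
        | nil => intro _; rfl
        | cons d tl2 IH =>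
          intro hdt
          rw [pvGoSpec_cons d tl2 true a]
          rcases pv_digit_cases d (hdt d (by simp)) with rfl|rfl|rfl|rfl|rfl|rfl|rfl|rfl|rfl|rfl <;>
            exact IH _ (fun x hx => hdt x (by simp [hx]))
      · conv_lhs => whnf
        rw [pv_entry '8' tl]
        generalize (0 : Nat) * 10 + ('8'.toNat - '0'.toNat) = a
        clear hd hne h1 h2 hW hR
        revert hdt
        induction tl generalizing a with
        | nil => intro _; rfl
        | cons d tl2 IH =>
          intro hdt
          rw [pvGoSpec_cons d tl2 true a]
          rcases pv_digit_cases d (hdt d (by simp)) with rfl|rfl|rfl|rfl|rfl|rfl|rfl|rfl|rfl|rfl <;>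
            exact IH _ (fun x hx => hdt x (by simp [hx]))
      · conv_lhs => whnf
        rw [pv_entry '9' tl]
        generalize (0 : Nat) * 10 + ('9'.toNat - '0'.toNat) = a
        clear hd hne h1 h2 hW hR
        revert hdt
        induction tl generalizing a with
        | nil => intro _; rfl
        | cons d tl2 IH =>
          intro hdt
          rw [pvGoSpec_cons d tl2 true a]
          rcases pv_digit_cases d (hdt d (by simp)) with rfl|rfl|rfl|rfl|rfl|rfl|rfl|rfl|rfl|rfl <;>
            exact IH _ (fun x hx => hdt x (by simp [hx]))

-- decimal digit list of n (msd first), = Nat.toDigits 10 n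
def pvDigs (n : Nat) : List Char :=
  if h : n < 10 then [Nat.digitChar n] else pvDigs (n / 10) ++ [Nat.digitChar (n % 10)]
decreasing_by exact Nat.div_lt_self (by omega) (by omega)

theorem pv_toDigitsCore (f : Nat) : ∀ n acc, n < 10 ^ f → 0 < f →
    Nat.toDigitsCore 10 f n acc = pvDigs n ++ acc := by
  induction f with
  | zero => omega
  | succ f ih =>
    intro n acc hlt _
    rw [Nat.toDigitsCore]
    by_cases h10 : n < 10
    · have : n / 10 = 0 := Nat.div_eq_of_lt h10
      rw [if_pos this, pvDigs, dif_pos h10]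
      have : n % 10 = n := Nat.mod_eq_of_lt h10
      rw [this]; rfl
    · have hne : ¬ n / 10 = 0 := by omega
      rw [if_neg hne]
      have hf : 0 < f := by
        by_contra hf0
        have : f = 0 := by omega
        subst this
        simp at hlt
        omega
      rw [ih (n / 10) (Nat.digitChar (n % 10) :: acc) (by
        have h := Nat.pow_succ 10 f ▸ hlt
        exact Nat.div_lt_of_lt_mul (by omega)) hf]
      conv_rhs => rw [pvDigs, dif_neg h10]
      simp

theorem pv_toDigits_eq (n : Nat) : Nat.toDigits 10 n = pvDigs n := by
  have h : n < 10 ^ (n + 1) := by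
    calc n < 2 ^ n := Nat.lt_two_pow_self
    _ ≤ 10 ^ n := Nat.pow_le_pow_left (by omega) n
    _ ≤ 10 ^ (n + 1) := Nat.pow_le_pow_right (by omega) (by omega)
  simpa using pv_toDigitsCore (n + 1) n [] h (by omega)

theorem pv_digitChar_digit (k : Nat) (h : k < 10) : (Nat.digitChar k).isDigit = true := by
  interval_cases k <;> decide

theorem pv_digitChar_val (k : Nat) (h : k < 10) : (Nat.digitChar k).toNat - '0'.toNat = k := by
  interval_cases k <;> decide

theorem pvDigs_digits (n : Nat) : ∀ c ∈ pvDigs n, c.isDigit = true := by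
  induction n using Nat.strong_induction_on with
  | _ n ih =>
    intro c hc
    by_cases h : n < 10
    · rw [pvDigs, dif_pos h] at hc
      simp at hc
      subst hc; exact pv_digitChar_digit n h
    · rw [pvDigs, dif_neg h] at hc
      rcases List.mem_append.mp hc with h1 | h2
      · exact ih (n / 10) (Nat.div_lt_self (by omega) (by omega)) c h1
      · simp at h2; subst h2; exact pv_digitChar_digit (n % 10) (Nat.mod_lt _ (by omega))

theorem pvDigs_ne_nil (n : Nat) : pvDigs n ≠ [] := by
  by_cases h : n < 10
  · rw [pvDigs, dif_pos h]; simp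
  · rw [pvDigs, dif_neg h]; simp

theorem pvValD_append (l1 l2 : List Char) :
    pvValD (l1 ++ l2) = pvValD l1 * 10 ^ l2.length + pvValD l2 := by
  unfold pvValD
  rw [List.foldl_append, pvValD_foldl]
  rfl

theorem pvValD_pvDigs (n : Nat) : pvValD (pvDigs n) = n := by
  induction n using Nat.strong_induction_on with
  | _ n ih =>
    by_cases h : n < 10
    · rw [pvDigs, dif_pos h]
      have := pv_digitChar_val n h
      simp [pvValD]
      have h0 : '0'.toNat = 48 := by decide
      omega
    · rw [pvDigs, dif_neg h, pvValD_append,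
        ih (n / 10) (Nat.div_lt_self (by omega) (by omega))]
      have := pv_digitChar_val (n % 10) (Nat.mod_lt _ (by omega))
      simp [pvValD]
      have h0 : '0'.toNat = 48 := by decide
      omega

theorem pv_mapW (X : Option Nat) :
    (Option.map (fun n : Int => n) (X >>= fun a => pure (↑a : Int))) = X.map Nat.cast := by
  cases X <;> rfl

theorem pv_isIntSpace_false (c : Char) (h : c.isDigit = true ∨ c = '-') :
    PySem.Int.isIntSpace c = false := by
  rcases h with h | rfl
  · exact pv_isIntSpace_of_digit c h
  · decide

theorem pv_dropWhile_dd (l : List Char) (hd : ∀ c ∈ l, c.isDigit = true ∨ c = '-') :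
    List.dropWhile PySem.Int.isIntSpace l = l := by
  cases l with
  | nil => rfl
  | cons c tl =>
    rw [List.dropWhile_cons_of_neg]
    simp [pv_isIntSpace_false c (hd c (by simp))]

theorem pv_ofChars_neg_digits (ds : List Char) (hne : ds ≠ []) (hd : ∀ c ∈ ds, c.isDigit = true) :
    PySem.Int.ofChars? ('-' :: ds) = some (-(pvValD ds : Int)) := by
  have h := pv_ofChars_digits ds hne hd
  simp only [PySem.Int.ofChars?] at h ⊢
  rw [pv_dropWhile_digits _ hd] at h
  rw [pv_dropWhile_digits _ (by intro x hx; exact hd x (by rw [List.mem_reverse] at hx; exact hx))] at h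
  rw [List.reverse_reverse] at h
  have hdd : ∀ c ∈ '-' :: ds, c.isDigit = true ∨ c = '-' := by
    intro x hx
    rcases List.mem_cons.mp hx with rfl | hx'
    · right; rfl
    · left; exact hd x hx'
  rw [pv_dropWhile_dd _ hdd]
  rw [pv_dropWhile_dd _ (by intro x hx; exact hdd x (by rw [List.mem_reverse] at hx; exact hx))]
  rw [List.reverse_reverse]
  split at h
  · exact absurd (hd '-' (by simp)) (by decide)
  · exact absurd (hd '+' (by simp)) (by decide)
  · rename_i h1 h2
    rw [pv_mapW] at h
    rcases Option.map_eq_some_iff.mp h with ⟨v, hv, hveq⟩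
    have hv' : v = pvValD ds := Nat.cast_inj.mp hveq
    subst hv'
    split
    · next cs2 ds2 heq =>
      obtain ⟨_, rfl⟩ := (List.cons.injEq ..).mp heq
      rw [hv]
      rfl
    · next cs2 ds2 heq => exact absurd ((List.cons.injEq ..).mp heq).1 (by decide)
    · next cs2 g1 g2 => exact absurd rfl (g1 ds)

theorem pv_ofChars_toChars (k : Int) : PySem.Int.ofChars? (PySem.Int.toChars k) = some k := by
  unfold PySem.Int.toChars
  by_cases hk : k < 0
  · rw [if_pos hk, pv_toDigits_eq]
    rw [pv_ofChars_neg_digits _ (pvDigs_ne_nil _) (pvDigs_digits _), pvValD_pvDigs]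
    congr 1
    omega
  · rw [if_neg hk, pv_toDigits_eq]
    rw [pv_ofChars_digits _ (pvDigs_ne_nil _) (pvDigs_digits _), pvValD_pvDigs]
    simp
    omega

theorem pv_roundtrip (k : Int) : (PySem.Int.ofChars? (PySem.Int.toChars k)).getD 0 = k := by
  rw [pv_ofChars_toChars]
  rfl

-- ---- stripping: A's two while loops = Python strip(' ') ----

theorem pv_pyGet_neg_one (l : List Char) : PySem.List.pyGet? l (-1) = l.getLast? := by
  cases l with
  | nil => rfl
  | cons a t =>
    simp [PySem.List.pyGet?, PySem.List.pyIdx?, List.getLast?_eq_getElem?]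

theorem pv_pyGet_zero (l : List Char) : PySem.List.pyGet? l 0 = l.head? := by
  cases l with
  | nil => rfl
  | cons a t => simp [PySem.List.pyGet?, PySem.List.pyIdx?]

theorem pvStripR_eq (l : List Char) : pvStripR l = List.rdropWhile (fun c => c == ' ') l := by
  induction l using List.reverseRecOn with
  | nil => rw [pvStripR]; simp [PySem.List.pyGet?, PySem.List.pyIdx?]
  | append_singleton t a ih =>
    rw [pvStripR, pv_pyGet_neg_one, List.rdropWhile_concat]
    by_cases ha : a = ' '
    · subst ha
      rw [dif_pos (by simp), if_pos (by simp)]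
      rw [List.dropLast_concat]
      exact ih
    · rw [dif_neg (by simp [ha]), if_neg (by simp [ha])]

theorem pvStripL_eq (l : List Char) : pvStripL l = List.dropWhile (fun c => c == ' ') l := by
  induction l with
  | nil => rw [pvStripL]; simp [PySem.List.pyGet?, PySem.List.pyIdx?]
  | cons a t ih =>
    rw [pvStripL, pv_pyGet_zero]
    by_cases ha : a = ' '
    · subst ha
      rw [dif_pos (by simp), List.dropWhile_cons_of_pos (by simp)]
      exact ih
    · rw [dif_neg (by simp [ha]), List.dropWhile_cons_of_neg (by simp [ha])]

theorem pv_drop_rdrop_comm (p : Char → Bool) (l : List Char) :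
    List.dropWhile p (List.rdropWhile p l) = List.rdropWhile p (List.dropWhile p l) := by
  induction l using List.reverseRecOn with
  | nil => rfl
  | append_singleton t a ih =>
    rw [List.rdropWhile_concat, List.dropWhile_append]
    by_cases ha : p a = true
    · rw [if_pos ha, ih]
      by_cases hemp : (List.dropWhile p t).isEmpty = true
      · rw [if_pos hemp, List.isEmpty_iff.mp hemp]
        show List.rdropWhile p [] = List.rdropWhile p (List.dropWhile p [a])
        rw [show List.dropWhile p [a] = [] from by simp [List.dropWhile_cons_of_pos ha]]
      · rw [if_neg hemp, List.rdropWhile_concat, if_pos ha]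
    · rw [if_neg ha]
      by_cases hemp : (List.dropWhile p t).isEmpty = true
      · rw [if_pos hemp]
        rw [show List.dropWhile p (t ++ [a]) = [a] from by
          rw [List.dropWhile_append, if_pos hemp]
          simp [List.dropWhile_cons_of_neg ha]]
        rw [show List.dropWhile p [a] = [a] from by simp [List.dropWhile_cons_of_neg ha]]
        show [a] = List.rdropWhile p ([] ++ [a])
        rw [List.rdropWhile_concat, if_neg ha]
        simp
      · rw [if_neg hemp]
        rw [show List.dropWhile p (t ++ [a]) = List.dropWhile p t ++ [a] from by
          rw [List.dropWhile_append, if_neg hemp]]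
        rw [List.rdropWhile_concat, if_neg ha]

theorem pv_strip_eq (l : List Char) :
    pvStripL (pvStripR l) = PySem.Chars.stripChars l [' '] := by
  rw [pvStripL_eq, pvStripR_eq, PySem.Chars.stripChars]
  have hp : (fun c => ([' '] : List Char).contains c) = (fun c : Char => c == ' ') := by
    funext c
    cases h : c == ' ' <;> simp_all
  rw [hp]
  exact pv_drop_rdrop_comm _ l

-- last index of a char
def pvLastC (c : Char) : List Char → Option Nat
  | [] => none
  | a :: t =>
    match pvLastC c t with
    | some j => some (j + 1)
    | none => if a = c then some 0 else none

theorem pvLastC_isSome_iff (c : Char) (l : List Char) : (pvLastC c l).isSome = true ↔ c ∈ l := by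
  induction l with
  | nil => simp [pvLastC]
  | cons a t ih =>
    rw [pvLastC]
    cases h : pvLastC c t with
    | some j => simp [h] at ih ⊢; right; exact ih
    | none =>
      simp [h] at ih ⊢
      by_cases hac : a = c
      · simp [hac]
      · simp [hac, ih]
        intro hh
        exact hac hh.symm

theorem pvLastC_concat (c : Char) (l : List Char) (a : Char) :
    pvLastC c (l ++ [a]) = if a = c then some l.length else pvLastC c l := by
  induction l with
  | nil =>
    by_cases h : a = c <;> simp [pvLastC, h]
  | cons b t ih =>
    rw [List.cons_append, pvLastC, ih, pvLastC]
    by_cases hac : a = c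
    · simp [hac]
    · rw [if_neg hac, if_neg hac]

theorem pv_isPrefixOf_single (c : Char) (l : List Char) :
    ([c].isPrefixOf l) = (l.head? == some c) := by
  cases l with
  | nil => rfl
  | cons a t =>
    simp [List.isPrefixOf]
    constructor
    · intro h; exact h.symm ▸ rfl
    · intro h; exact h.symm ▸ rfl

theorem pv_rfind_go (t : List Char) (c : Char) (j : Nat) :
    PySem.Chars.rfind.go t [c] j =
      (match pvLastC c (t.take (j + 1)) with
       | some i => (i : Int)
       | none => -1) := by
  induction j with
  | zero =>
    rw [PySem.Chars.rfind.go]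
    cases t with
    | nil => rfl
    | cons a tt =>
      rw [pv_isPrefixOf_single]
      by_cases hac : a = c
      · simp [pvLastC, hac]
      · have : ((a :: tt).head? == some c) = false := by simp [hac]
        rw [this]
        simp [pvLastC, hac]
  | succ j ih =>
    rw [PySem.Chars.rfind.go, pv_isPrefixOf_single, ih]
    by_cases hj : j + 1 < t.length
    · rw [List.head?_drop]
      conv_rhs => rw [List.take_add_one]
      cases hg : t[j+1]? with
      | none => simp at hg; omega
      | some b =>
        simp only [Option.toList_some]
        by_cases hbc : b = c
        · subst hbc
          simp [pvLastC_concat, List.length_take, Nat.min_eq_left (le_of_lt hj)]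
        · have hbcf : (some b == some c) = false := by simp [hbc]
          rw [hbcf]
          simp [pvLastC_concat, hbc]
    · have hdrop : t.drop (j + 1) = [] := List.drop_eq_nil_of_le (by omega)
      rw [hdrop]
      have h1 : t.take (j + 2) = t.take (j + 1) := by
        rw [List.take_of_length_le (by omega), List.take_of_length_le (by omega)]
      rw [h1]
      rfl

theorem pv_rfind_single (t : List Char) (c : Char) :
    PySem.Chars.rfind t [c] =
      (match pvLastC c t with
       | some i => (i : Int)
       | none => -1) := by
  rw [PySem.Chars.rfind, pv_rfind_go]
  rw [List.take_of_length_le (by omega)]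

theorem pv_isIn_single (c : Char) (t : List Char) :
    PySem.Chars.isIn [c] t = true ↔ c ∈ t := by
  rw [PySem.Chars.isIn_iff_infix, List.singleton_infix_iff]

-- enumerate + filter + getLast?
theorem pv_enum_filter_last (c : Char) (t : List Char) : ∀ k : Int,
    ((PySem.List.enumerate t k).filter (fun p => p.2 == c)).getLast? =
      (pvLastC c t).map (fun j => (k + (j : Int), c)) := by
  induction t with
  | nil => intro k; rfl
  | cons a tt ih =>
    intro k
    rw [PySem.List.enumerate_cons, pvLastC]
    rw [List.filter_cons]
    cases hl : pvLastC c tt with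
    | some j =>
      have hih := ih (k + 1)
      rw [hl] at hih
      split
      · rw [List.getLast?_cons, hih]
        simp
        omega
      · rw [hih]
        simp
        omega
    | none =>
      have hih := ih (k + 1)
      rw [hl] at hih
      have hnil : ((PySem.List.enumerate tt (k+1)).filter (fun p => p.2 == c)) = [] := by
        have := hih
        simpa using this
      split
      · next hcond =>
        have hac : a = c := by simpa using hcond
        rw [hnil]
        simp [hac]
      · next hcond =>
        have hac : ¬ a = c := by simpa using hcond
        rw [hnil]
        simp [hac]

-- the A-loop computes the "last x / last ^" values
theorem pv_foldA (t : List Char) (sign : Int) (l : List (Int × Char)) : ∀ (c0 e0 : Int),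
    l.foldl (pvStepA t sign) (c0, e0) =
      ((match (l.filter (fun p => p.2 == 'x')).getLast? with
        | none => c0
        | some p => if p.1 = 0 then (if sign = 1 then (1 : Int) else -1)
            else (PySem.Int.ofChars? (PySem.List.slice t none (some p.1))).getD 0),
       (match (l.filter (fun p => p.2 == '^')).getLast? with
        | none => e0
        | some p => (PySem.Int.ofChars? (PySem.List.slice t (some (p.1 + 1)) none)).getD 0)) := by
  induction l using List.reverseRecOn with
  | nil => intro c0 e0; rfl
  | append_singleton l p ih =>
    intro c0 e0
    rw [List.foldl_append, ih, List.foldl_cons, List.foldl_nil]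
    rw [List.filter_append, List.filter_append]
    unfold pvStepA
    by_cases hx : p.2 = 'x'
    · rw [if_pos hx]
      have h1 : List.filter (fun p => p.2 == 'x') [p] = [p] := by simp [hx]
      have h2 : List.filter (fun p => p.2 == '^') [p] = [] := by simp [hx]
      rw [h1, h2, List.append_nil]
      rw [List.getLast?_append]
      simp
    · rw [if_neg hx]
      by_cases hc : p.2 = '^'
      · rw [if_pos hc]
        have h1 : List.filter (fun p => p.2 == 'x') [p] = [] := by simp [hc]
        have h2 : List.filter (fun p => p.2 == '^') [p] = [p] := by simp [hc]
        rw [h1, h2, List.append_nil]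
        rw [List.getLast?_append]
        simp
      · have h1 : List.filter (fun p => p.2 == 'x') [p] = [] := by simp [hx]
        have h2 : List.filter (fun p => p.2 == '^') [p] = [] := by simp [hc]
        rw [h1, h2, List.append_nil, List.append_nil, if_neg hc]

-- ---- A's trailing replace('+ -','- ') vs B's arithmetic sign formatting ----

theorem pv_go_succ (old new : List Char) (fuel : Nat) (c : Char) (t acc : List Char) :
    PySem.Chars.replace.go old new (fuel + 1) (c :: t) acc =
      if old.isPrefixOf (c :: t) = true then
        PySem.Chars.replace.go old new fuel (List.drop old.length (c :: t)) (new.reverse ++ acc)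
      else PySem.Chars.replace.go old new fuel t (c :: acc) := rfl

theorem pv_go_nil (old new acc : List Char) (fuel : Nat) :
    PySem.Chars.replace.go old new (fuel + 1) [] acc = acc.reverse := rfl

-- if '+' never occurs, the pattern '+ -' never matches and go copies the list
theorem pv_go_no_plus (fuel : Nat) : ∀ (l acc : List Char), '+' ∉ l →
    PySem.Chars.replace.go ['+', ' ', '-'] ['-', ' '] fuel l acc = acc.reverse ++ l := by
  induction fuel with
  | zero => intro l acc _; rfl
  | succ fuel ih =>
    intro l acc hl
    cases l with
    | nil => rw [pv_go_nil]; simp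
    | cons c t =>
      have hc : ¬ c = '+' := fun h => hl (h ▸ List.mem_cons_self)
      have ht : '+' ∉ t := fun h => hl (List.mem_cons_of_mem _ h)
      rw [pv_go_succ, if_neg (by simp [List.isPrefixOf]; intro h; exact absurd h.symm hc)]
      rw [ih t (c :: acc) ht]
      simp

theorem pv_plus_not_mem_toChars (k : Int) : '+' ∉ PySem.Int.toChars k := by
  unfold PySem.Int.toChars
  split
  · rw [pv_toDigits_eq]
    intro h
    rcases List.mem_cons.mp h with h | h
    · exact absurd h (by decide)
    · exact absurd (pvDigs_digits _ _ h) (by decide)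
  · rw [pv_toDigits_eq]
    intro h
    exact absurd (pvDigs_digits _ _ h) (by decide)

-- KEY core: replace('+ -','- ') on " + " ++ rest rewrites only the leading sign
theorem pv_replace_core (rest : List Char) (h : '+' ∉ rest) :
    PySem.Chars.replace (' ' :: '+' :: ' ' :: rest) ['+', ' ', '-'] ['-', ' '] =
      if (['-'] : List Char).isPrefixOf rest then ' ' :: '-' :: ' ' :: rest.tail
      else ' ' :: '+' :: ' ' :: rest := by
  simp only [PySem.Chars.replace, List.isEmpty_cons, Bool.false_eq_true, if_false]
  rw [show (' ' :: '+' :: ' ' :: rest).length = (rest.length + 2) + 1 from by simp]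
  rw [pv_go_succ, if_neg (by simp [List.isPrefixOf])]
  rw [show rest.length + 2 = (rest.length + 1) + 1 from rfl]
  rw [pv_go_succ]
  have hpre : (['+', ' ', '-'] : List Char).isPrefixOf ('+' :: ' ' :: rest)
      = (['-'] : List Char).isPrefixOf rest := by
    simp [List.isPrefixOf]
  rw [hpre]
  by_cases hp : (['-'] : List Char).isPrefixOf rest
  · rw [if_pos hp, if_pos hp]
    obtain ⟨tl, rfl⟩ : ∃ tl, rest = '-' :: tl := by
      cases rest with
      | nil => simp [List.isPrefixOf] at hp
      | cons a t =>
        simp [List.isPrefixOf] at hp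
        exact ⟨t, by rw [hp]⟩
    have htl : '+' ∉ tl := fun hm => h (List.mem_cons_of_mem _ hm)
    rw [show List.drop (['+', ' ', '-'] : List Char).length ('+' :: ' ' :: '-' :: tl) = tl from rfl]
    rw [pv_go_no_plus _ _ _ htl]
    rfl
  · rw [if_neg hp, if_neg hp]
    rw [pv_go_succ, if_neg (by simp [List.isPrefixOf])]
    rw [pv_go_no_plus _ _ _ h]
    rfl

-- formatting: A's " + " ++ str(v) ++ suf then replace = B's sign branch ++ str(abs v) ++ suf
theorem pv_replace_fmt (v : Int) (suf : List Char) (hs : '+' ∉ suf) :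
    PySem.Chars.replace ([' ', '+', ' '] ++ PySem.Int.toChars v ++ suf) ['+', ' ', '-'] ['-', ' '] =
      (if v < 0 then [' ', '-', ' '] else [' ', '+', ' ']) ++
        PySem.Int.toChars ((v.natAbs : Nat) : Int) ++ suf := by
  have hrest : '+' ∉ PySem.Int.toChars v ++ suf := by
    intro h
    rcases List.mem_append.mp h with h | h
    · exact pv_plus_not_mem_toChars v h
    · exact hs h
  have hshape : ([' ', '+', ' '] ++ PySem.Int.toChars v ++ suf)
      = ' ' :: '+' :: ' ' :: (PySem.Int.toChars v ++ suf) := by simp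
  rw [hshape, pv_replace_core _ hrest]
  have habs : PySem.Int.toChars ((v.natAbs : Nat) : Int) = pvDigs v.natAbs := by
    unfold PySem.Int.toChars
    rw [if_neg (by omega), pv_toDigits_eq]
    congr 1 <;> omega
  by_cases hv : v < 0
  · have hvt : PySem.Int.toChars v = '-' :: pvDigs v.natAbs := by
      unfold PySem.Int.toChars
      rw [if_pos hv, pv_toDigits_eq]
    rw [hvt]
    rw [if_pos (by simp [List.isPrefixOf]), if_pos hv, habs]
    simp
  · have hvt : PySem.Int.toChars v = pvDigs v.toNat := by
      unfold PySem.Int.toChars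
      rw [if_neg hv, pv_toDigits_eq]
    have hd : pvDigs v.toNat ≠ [] := pvDigs_ne_nil _
    have hhead : ((pvDigs v.toNat ++ suf).head? == some '-') = false := by
      obtain ⟨c, tl, hc⟩ := List.exists_cons_of_ne_nil hd
      have hcd : c.isDigit = true := pvDigs_digits _ c (by rw [hc]; simp)
      rw [hc]
      simp only [List.cons_append, List.head?_cons]
      rcases pv_digit_cases c hcd with rfl|rfl|rfl|rfl|rfl|rfl|rfl|rfl|rfl|rfl <;> decide
    rw [hvt]
    rw [if_neg (by rw [pv_isPrefixOf_single, hhead]; simp), if_neg hv, habs]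
    have : pvDigs v.natAbs = pvDigs v.toNat := by congr 1; omega
    rw [this]
    simp

theorem pv_replace_fmt0 (v : Int) :
    PySem.Chars.replace ([' ', '+', ' '] ++ PySem.Int.toChars v) ['+', ' ', '-'] ['-', ' '] =
      (if v < 0 then [' ', '-', ' '] else [' ', '+', ' ']) ++
        PySem.Int.toChars ((v.natAbs : Nat) : Int) := by
  have h := pv_replace_fmt v [] (by simp)
  simpa using h

set_option maxHeartbeats 2000000 in
theorem pv_ports_eq (term : String) (sign : Int) :
    derive_term term sign = derive_term_alt term sign := by
  simp only [derive_term, derive_term_alt]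
  rw [pv_strip_eq]
  set t := PySem.Chars.stripChars term.toList [' '] with ht
  by_cases hx : PySem.Chars.isIn ['x'] t = false
  · rw [if_pos hx, if_pos hx]
    rfl
  · rw [if_neg hx, if_neg hx]
    have hxt : 'x' ∈ t := (pv_isIn_single _ _).mp (by revert hx; cases PySem.Chars.isIn ['x'] t <;> simp)
    have htne : t ≠ [] := List.ne_nil_of_mem hxt
    obtain ⟨jx, hjx⟩ : ∃ j, pvLastC 'x' t = some j := by
      have hs := (pvLastC_isSome_iff 'x' t).mpr hxt
      cases h : pvLastC 'x' t
      · rw [h] at hs; simp at hs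
      · exact ⟨_, rfl⟩
    have hfold := pv_foldA t sign (PySem.List.enumerate t 0) 0 0
    rw [pv_enum_filter_last, pv_enum_filter_last, hjx] at hfold
    simp only [Option.bind_eq_bind, Option.bind_some, Option.pure_def, Option.map_some, zero_add] at hfold
    have hrx : PySem.Chars.rfind t ['x'] = (jx : Int) := by
      rw [pv_rfind_single, hjx]
    have hsl : PySem.List.slice t none (some ((jx : Nat) : Int)) = List.take jx t := by
      rw [PySem.List.slice_to t (by omega)]
      simp
    have hco : (if ((jx : Nat) : Int) = 0 then (if sign = 1 then (1 : Int) else -1)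
          else (PySem.Int.ofChars? (PySem.List.slice t none (some ((jx : Nat) : Int)))).getD 0)
        = (if PySem.List.slice t none (some (PySem.Chars.rfind t ['x'])) = []
            then (if sign = 1 then (1 : Int) else -1)
          else (PySem.Int.ofChars? (PySem.List.slice t none (some (PySem.Chars.rfind t ['x'])))).getD 0) := by
      rw [hrx, hsl]
      by_cases hj0 : jx = 0
      · subst hj0; simp
      · rw [if_neg (by simpa using hj0), if_neg (by simp [List.take_eq_nil_iff, hj0, htne])]
    by_cases hc : PySem.Chars.isIn ['^'] t = false
    · rw [if_pos hc, if_pos hc]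
      rw [hfold]
      dsimp only
      rw [hco]
      rw [pv_replace_fmt0]
      simp
    · rw [if_neg hc, if_neg hc]
      have hct : '^' ∈ t := (pv_isIn_single _ _).mp (by revert hc; cases PySem.Chars.isIn ['^'] t <;> simp)
      obtain ⟨jc, hjc⟩ : ∃ j, pvLastC '^' t = some j := by
        have hs := (pvLastC_isSome_iff '^' t).mpr hct
        cases h : pvLastC '^' t
        · rw [h] at hs; simp at hs
        · exact ⟨_, rfl⟩
      rw [hjc] at hfold
      simp only [Option.bind_some, Option.map_some] at hfold
      have hrc : PySem.Chars.rfind t ['^'] = (jc : Int) := by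
        rw [pv_rfind_single, hjc]
      rw [hfold, hrc]
      dsimp only
      rw [hco, pv_roundtrip, ← mul_assoc]
      set co := (if PySem.List.slice t none (some (PySem.Chars.rfind t ['x'])) = []
            then (if sign = 1 then (1 : Int) else -1)
          else (PySem.Int.ofChars? (PySem.List.slice t none (some (PySem.Chars.rfind t ['x'])))).getD 0) with hcodef
      set ex := (PySem.Int.ofChars? (PySem.List.slice t (some ((jc : Int) + 1)) none)).getD 0 with hexdef
      by_cases he : ex = 2
      · rw [if_pos (by omega : ex - 1 = 1), if_pos he]
        rw [pv_replace_fmt _ ['x'] (by decide)]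
      · rw [if_neg (by omega : ¬ ex - 1 = 1), if_neg he]
        have hsuf : '+' ∉ ('x' :: '^' :: PySem.Int.toChars (ex - 1)) := by
          intro hm
          rcases List.mem_cons.mp hm with h | hm
          · exact absurd h (by decide)
          · rcases List.mem_cons.mp hm with h | hm
            · exact absurd h (by decide)
            · exact pv_plus_not_mem_toChars _ hm
        have hshape2 : ([' ', '+', ' '] ++ PySem.Int.toChars (sign * co * ex) ++ ['x', '^'] ++ PySem.Int.toChars (ex - 1))
            = [' ', '+', ' '] ++ PySem.Int.toChars (sign * co * ex) ++ ('x' :: '^' :: PySem.Int.toChars (ex - 1)) := by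
          simp
        rw [hshape2, pv_replace_fmt _ _ hsuf]
        simp

-- ===== VERDICT (by name: the statement is the Claim_ definition above) =====
theorem derive_term_spec : Claim_equal_derive_term := by
  intro term sign _ _
  unfold Spec_derive_term
  exact pv_ports_eq term sign
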